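-- pv_equiv track=rewrite | github.com/pypi-data/pypi-mirror-344 | packages/abstract-ocr/abstract_ocr-0.0.0.210-py3-none-any.whl/abstract_ocr/video_utils.py | split_it_out
-- ===== SOURCE A (Python) =====
-- def split_it_out(obj1,obj2):
--     obj_3=obj2
--     if obj2 and obj1 and obj1.lower() in obj2.lower():
--         start =0
--         obj_3=''
--         obj2_spl = obj2.lower().split(obj1.lower())
--         len_obj1 = len(obj1)
--         for each in obj2_spl:
--             end = start+len(each)
--             obj_3 += obj2[start:end]
--             start +=len_obj1+len(each)
--     return obj_3
-- ===== SOURCE B (Python) =====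
-- def split_it_out(obj1, obj2):
--     if not (obj1 and obj2):
--         return obj2
--     lo1 = obj1.lower()
--     lo2 = obj2.lower()
--     n = len(obj1)
--     out = []
--     i = 0
--     while i < len(obj2):
--         if lo2[i:i + n] == lo1:
--             i += n
--         else:
--             out.append(obj2[i])
--             i += 1
--     return ''.join(out)
-- ===== Notes on version B (the rewrite author's own statement) =====
-- stated objective: simpler
-- what changed: Replaced the split-on-lowercase-then-rebuild-segments-by-index-arithmetic scheme with a single direct match-and-skip scan over the original string comparing the lowercased window at each position.
import Mathlib
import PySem

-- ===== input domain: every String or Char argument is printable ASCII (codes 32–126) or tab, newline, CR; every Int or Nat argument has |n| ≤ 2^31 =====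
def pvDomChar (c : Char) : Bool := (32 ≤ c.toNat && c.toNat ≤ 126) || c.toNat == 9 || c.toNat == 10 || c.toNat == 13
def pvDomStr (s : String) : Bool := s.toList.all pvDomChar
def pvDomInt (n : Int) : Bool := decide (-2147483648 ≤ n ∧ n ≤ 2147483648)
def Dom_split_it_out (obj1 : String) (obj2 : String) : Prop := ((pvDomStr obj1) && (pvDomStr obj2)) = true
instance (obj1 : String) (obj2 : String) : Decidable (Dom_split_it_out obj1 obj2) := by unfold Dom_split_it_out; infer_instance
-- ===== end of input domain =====

-- B replaces A's split-on-lowercase + rebuild-segments-by-index-arithmetic with one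
-- direct match-and-skip scan over the original string (simpler decomposition).

-- ===== PORT A =====
-- A's loop 'for each in obj2_spl: … obj_3 += obj2[start:end] …' as a foldl over the
-- same state (obj_3, start); obj2[start:end] is PySem.List.slice on code points.
def split_it_out (obj1 : String) (obj2 : String) : String :=
  let obj_3 := obj2
  if obj2 ≠ "" ∧ obj1 ≠ "" ∧
      PySem.Chars.isIn (PySem.Chars.lower obj1.toList) (PySem.Chars.lower obj2.toList) = true then
    let obj2_spl := PySem.Chars.splitOn (PySem.Chars.lower obj2.toList) (PySem.Chars.lower obj1.toList)
    let len_obj1 := obj1.toList.length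
    let r := obj2_spl.foldl
      (fun (st : List Char × Nat) each =>
        let start := st.2
        let «end» := start + each.length
        (st.1 ++ PySem.List.slice obj2.toList (some (start : Int)) (some («end» : Int)),
         start + len_obj1 + each.length))
      ([], 0)
    String.ofList r.1
  else obj_3

-- ===== PORT B =====
-- B's while loop over index i, as recursion over the remaining suffix of obj2:
-- lo2[i:i+n] == lo1 is 'lo1 is a prefix of the lowered suffix'; match skips n chars.
def altScan (a : Char) (t : List Char) : List Char → List Char
  | [] => []
  | c :: rest =>
    if (a :: t).isPrefixOf (PySem.Chars.lower (c :: rest)) then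
      altScan a t (List.drop (a :: t).length (c :: rest))
    else
      c :: altScan a t rest
termination_by s => s.length
decreasing_by
  · simp only [List.length_drop, List.length_cons]; omega
  · simp

def split_it_out_alt (obj1 : String) (obj2 : String) : String :=
  if obj1 = "" ∨ obj2 = "" then obj2
  else
    match PySem.Chars.lower obj1.toList with
    | [] => obj2   -- unreachable: obj1 ≠ "" and lower preserves length
    | a :: t => String.ofList (altScan a t obj2.toList)

-- ===== PRECONDITION & SPEC =====
def Spec_split_it_out (obj1 : String) (obj2 : String) (out : String) : Prop := out = split_it_out_alt obj1 obj2
instance (obj1 : String) (obj2 : String) (out : String) : Decidable (Spec_split_it_out obj1 obj2 out) := by unfold Spec_split_it_out; infer_instance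

-- ===== CLAIM (what is proved, stated in full; the proofs are below) =====
def Claim_equal_split_it_out : Prop := ∀ (obj1 : String) (obj2 : String), Dom_split_it_out obj1 obj2 → Spec_split_it_out obj1 obj2 (split_it_out obj1 obj2)

-- ===== LEMMAS AND PROOFS =====

-- A recursive model of Python's s.split(sep) for nonempty sep.
def splitModel (p : List Char) : List Char → List (List Char)
  | [] => [[]]
  | c :: rest =>
    if p.isPrefixOf (c :: rest) then
      [] :: splitModel p (List.drop (p.length - 1) rest)
    else
      match splitModel p rest with
      | [] => [[c]]          -- unreachable: splitModel never returns []
      | e :: es => (c :: e) :: es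
termination_by s => s.length
decreasing_by
  · simp only [List.length_drop, List.length_cons]; omega
  · simp

theorem splitModel_ne_nil (p s : List Char) : splitModel p s ≠ [] := by
  induction s using splitModel.induct p with
  | case1 => simp [splitModel]
  | case2 c rest h ih => simp only [splitModel, if_pos h]; simp
  | case3 c rest h heq ih => simp [splitModel, h, heq]
  | case4 c rest h e es heq ih => simp [splitModel, h, heq]

theorem go_eq_splitModel (p : List Char) (hp : p ≠ []) :
    ∀ fuel l cur acc, l.length < fuel →
      PySem.Chars.splitOn.go p fuel l cur acc
        = acc.reverse ++ (splitModel p l).modifyHead (cur.reverse ++ ·) := by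
  intro fuel
  induction fuel with
  | zero => intro l cur acc h; omega
  | succ n ih =>
    intro l cur acc h
    cases l with
    | nil =>
      simp [PySem.Chars.splitOn.go, splitModel]
    | cons c rest =>
      by_cases hpre : p.isPrefixOf (c :: rest) = true
      · cases p with
        | nil => simp at hp
        | cons a pt =>
          have hlen : (List.drop (a :: pt).length (c :: rest)).length < n := by
            simp only [List.length_drop, List.length_cons] at *
            omega
          simp only [PySem.Chars.splitOn.go, hpre, if_pos]
          rw [ih _ _ _ hlen]
          simp only [splitModel, hpre, if_pos, List.reverse_cons, List.reverse_nil,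
            List.nil_append, List.append_assoc, List.singleton_append, List.length_cons,
            List.drop_succ_cons, List.modifyHead_cons]
          simp only [Nat.add_sub_cancel, List.append_nil]
          rw [show (fun x : List Char => x) = id from rfl, List.modifyHead_id, id_eq]
      · have hlen : rest.length < n := by
          simp only [List.length_cons] at h; omega
        simp only [PySem.Chars.splitOn.go]
        rw [if_neg (by simp [hpre]), ih _ _ _ hlen]
        have hne := splitModel_ne_nil p rest
        cases hsm : splitModel p rest with
        | nil => exact absurd hsm hne
        | cons e es => simp [splitModel, hpre, hsm, List.modifyHead]
theorem splitOn_eq_splitModel (p s : List Char) (hp : p ≠ []) :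
    PySem.Chars.splitOn s p = splitModel p s := by
  unfold PySem.Chars.splitOn
  rw [go_eq_splitModel p hp _ _ _ _ (by omega)]
  have hne := splitModel_ne_nil p s
  cases hsm : splitModel p s with
  | nil => exact absurd hsm hne
  | cons e es => simp [List.modifyHead]

-- A's rebuild of the original string from the segment lengths, drop-as-you-go form.
def rebuild (n : Nat) : List Char → List (List Char) → List Char
  | _, [] => []
  | s, e :: rest => s.take e.length ++ rebuild n (s.drop (e.length + n)) rest

theorem foldl_eq_rebuild (orig : List Char) (n : Nat) :
    ∀ (segs : List (List Char)) (acc : List Char) (k : Nat),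
      (segs.foldl
        (fun (st : List Char × Nat) each =>
          (st.1 ++ PySem.List.slice orig (some (st.2 : Int)) (some ((st.2 + each.length : Nat) : Int)),
           st.2 + n + each.length))
        (acc, k)).1 = acc ++ rebuild n (orig.drop k) segs := by
  intro segs
  induction segs with
  | nil => intro acc k; simp [rebuild]
  | cons e es ih =>
    intro acc k
    simp only [List.foldl_cons]
    rw [ih]
    have hs : PySem.List.slice orig (some (k : Int)) (some ((k + e.length : Nat) : Int))
        = (orig.drop k).take e.length := by
      have := PySem.List.slice_natCast_add orig k e.length
      rw [← this]; push_cast; ring_nf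
    rw [hs, rebuild]
    have hD : orig.drop (k + n + e.length) = (orig.drop k).drop (e.length + n) := by
      rw [List.drop_drop]; ring_nf
    rw [hD, List.append_assoc]

theorem main_rebuild (a : Char) (t : List Char) :
    ∀ orig : List Char,
      rebuild (a :: t).length orig (splitModel (a :: t) (PySem.Chars.lower orig))
        = altScan a t orig := by
  intro orig
  induction orig using altScan.induct a t with
  | case1 =>
    simp [PySem.Chars.lower, splitModel, rebuild, altScan]
  | case2 c rest h ih =>
    have hlow : PySem.Chars.lower (c :: rest)
        = PySem.Chars.lowerChar c :: PySem.Chars.lower rest := by simp [PySem.Chars.lower]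
    have hdl : List.drop (a :: t).length (c :: rest) = List.drop t.length rest := by
      simp [List.length_cons]
    have hdrop : List.drop ((a :: t).length - 1) (PySem.Chars.lower rest)
        = PySem.Chars.lower (List.drop t.length rest) := by
      simp [PySem.Chars.lower, List.map_drop]
    rw [hdl] at ih
    rw [altScan, if_pos h, hdl]
    rw [hlow] at h
    rw [hlow, splitModel, if_pos h, hdrop]
    simp only [rebuild, List.take_zero, List.nil_append, Nat.zero_add, List.length_nil,
      List.length_cons, List.drop_succ_cons]
    simpa [List.length_cons] using ih
  | case3 c rest h ih =>
    rw [altScan, if_neg h]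
    have hlow : PySem.Chars.lower (c :: rest)
        = PySem.Chars.lowerChar c :: PySem.Chars.lower rest := by simp [PySem.Chars.lower]
    rw [hlow] at h ⊢
    rw [splitModel, if_neg h]
    have hne := splitModel_ne_nil (a :: t) (PySem.Chars.lower rest)
    cases hsm : splitModel (a :: t) (PySem.Chars.lower rest) with
    | nil => exact absurd hsm hne
    | cons e es =>
      rw [hsm] at ih
      simp only [rebuild, List.length_cons, List.take_succ_cons,]
      rw [← ih]
      simp only [rebuild, List.length_cons]
      rw [show e.length + 1 + (t.length + 1) = (e.length + (t.length + 1)) + 1 by ring,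
        List.drop_succ_cons, List.cons_append]

-- no-match case: if lo1 is not an infix of the lowered string, the scan changes nothing
theorem altScan_no_match (a : Char) (t : List Char) :
    ∀ s : List Char, ¬ ((a :: t) <:+: PySem.Chars.lower s) → altScan a t s = s := by
  intro s
  induction s using altScan.induct a t with
  | case1 => intro _; simp [altScan]
  | case2 c rest h ih =>
    intro hinf
    exact absurd ((List.isPrefixOf_iff_prefix.mp h).isInfix) hinf
  | case3 c rest h ih =>
    intro hinf
    rw [altScan, if_neg h, ih]
    intro hi
    apply hinf
    have hlow : PySem.Chars.lower (c :: rest)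
        = PySem.Chars.lowerChar c :: PySem.Chars.lower rest := by simp [PySem.Chars.lower]
    rw [hlow]
    exact hi.trans (List.suffix_cons _ _).isInfix

theorem toList_ne_nil_of_ne_empty (s : String) (h : s ≠ "") : s.toList ≠ [] := by
  intro hn
  apply h
  have := congrArg String.ofList hn
  simpa using this

-- ===== VERDICT (by name: the statement is the Claim_ definition above) =====
theorem split_it_out_spec : Claim_equal_split_it_out := by
  intro obj1 obj2 _
  unfold Spec_split_it_out
  by_cases h1 : obj1 = ""
  · simp [split_it_out, split_it_out_alt, h1]
  by_cases h2 : obj2 = ""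
  · simp [split_it_out, split_it_out_alt, h2]
  have hL : obj1.toList ≠ [] := toList_ne_nil_of_ne_empty obj1 h1
  have hpne : PySem.Chars.lower obj1.toList ≠ [] := by
    simp [PySem.Chars.lower, hL]
  cases hm : PySem.Chars.lower obj1.toList with
  | nil => exact absurd hm hpne
  | cons a t =>
    have hlen : obj1.toList.length = (a :: t).length := by
      rw [← hm]; simp [PySem.Chars.lower]
    have hB : split_it_out_alt obj1 obj2 = String.ofList (altScan a t obj2.toList) := by
      rw [split_it_out_alt, if_neg (by simp [h1, h2]), hm]
    rw [hB]
    by_cases hin : PySem.Chars.isIn (PySem.Chars.lower obj1.toList) (PySem.Chars.lower obj2.toList) = true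
    · -- matching branch on both sides
      rw [split_it_out]
      rw [if_pos ⟨h2, h1, hin⟩]
      simp only
      rw [foldl_eq_rebuild obj2.toList obj1.toList.length _ [] 0, List.drop_zero, List.nil_append]
      rw [splitOn_eq_splitModel _ _ hpne, hm, hlen, main_rebuild]
    · -- no occurrence: A keeps obj2; B's scan never matches and keeps every character
      rw [split_it_out]
      rw [if_neg (by intro hc; exact hin hc.2.2)]
      have hnin : ¬ ((a :: t) <:+: PySem.Chars.lower obj2.toList) := by
        rw [← hm]
        exact (PySem.Chars.isIn_eq_false_iff _ _).mp (by simpa using hin)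
      rw [altScan_no_match a t obj2.toList hnin]
      simp
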